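-- pv_equiv track=rewrite | github.com/Zandolfus/aspects-of-power | python/tier_utils.py | get_tier_for_level
-- ===== SOURCE A (Python) =====
-- from typing import List, Optional, Dict, Tuple
--
-- def get_tier_for_level(level: int, tier_thresholds: List[int]) -> int:
--     """Get the tier number for a given level using character's thresholds"""
--     if level < 1:
--         return 0
--
--     tier = 1
--     for threshold in sorted(tier_thresholds):
--         if level >= threshold:
--             tier += 1
--         else:
--             break
--     return tier
-- ===== SOURCE B (Python) =====
-- def get_tier_for_level(level, tier_thresholds):
--     """Get the tier number for a given level using character's thresholds"""
--     if level < 1: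
--         return 0
--     return 1 + sum(1 for t in tier_thresholds if t <= level)
-- ===== Notes on version B (the rewrite author's own statement) =====
-- stated objective: faster
-- what changed: B drops the sort entirely and counts thresholds <= level in one unsorted pass (the break in A only skips elements already known to be > level), instead of sorting and scanning with an accumulator and break.
import Mathlib
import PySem

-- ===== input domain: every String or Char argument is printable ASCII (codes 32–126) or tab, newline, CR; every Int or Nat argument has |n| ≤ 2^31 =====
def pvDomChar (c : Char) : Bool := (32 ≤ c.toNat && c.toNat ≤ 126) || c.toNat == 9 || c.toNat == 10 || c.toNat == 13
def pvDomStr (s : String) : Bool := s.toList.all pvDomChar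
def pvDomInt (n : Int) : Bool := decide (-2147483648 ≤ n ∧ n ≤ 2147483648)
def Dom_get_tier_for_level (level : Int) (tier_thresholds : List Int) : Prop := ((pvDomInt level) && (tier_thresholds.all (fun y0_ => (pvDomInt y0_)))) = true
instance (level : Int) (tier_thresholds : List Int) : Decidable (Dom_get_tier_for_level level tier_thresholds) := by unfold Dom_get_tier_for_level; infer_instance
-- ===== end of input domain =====

-- B removes the sort and counts thresholds ≤ level in one unsorted pass; A's break only skips elements already known to be > level.

-- ===== PORT A =====
-- the for-loop with break over sorted(tier_thresholds), carrying the accumulator `tier`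
def get_tier_loopA (level : Int) : List Int → Int → Int
  | [], tier => tier
  | t :: rest, tier => if level ≥ t then get_tier_loopA level rest (tier + 1) else tier

def get_tier_for_level (level : Int) (tier_thresholds : List Int) : Int :=
  if level < 1 then 0
  else get_tier_loopA level (PySem.List.sorted tier_thresholds (fun x => x) false) 1

-- ===== PORT B =====
-- 1 + sum(1 for t in tier_thresholds if t <= level)
def get_tier_for_level_alt (level : Int) (tier_thresholds : List Int) : Int :=
  if level < 1 then 0
  else 1 + tier_thresholds.foldl (fun acc t => if t ≤ level then acc + 1 else acc) 0

-- ===== PRECONDITION & SPEC =====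
def Spec_get_tier_for_level (level : Int) (tier_thresholds : List Int) (out : Int) : Prop := out = get_tier_for_level_alt level tier_thresholds
instance (level : Int) (tier_thresholds : List Int) (out : Int) : Decidable (Spec_get_tier_for_level level tier_thresholds out) := by unfold Spec_get_tier_for_level; infer_instance

-- ===== CLAIM (what is proved, stated in full; the proofs are below) =====
def Claim_equal_get_tier_for_level : Prop := ∀ (level : Int) (tier_thresholds : List Int), Dom_get_tier_for_level level tier_thresholds → Spec_get_tier_for_level level tier_thresholds (get_tier_for_level level tier_thresholds)

-- ===== LEMMAS AND PROOFS =====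

-- B's counting fold equals countP, shifted by the accumulator
theorem foldl_count_eq (level : Int) (l : List Int) (acc : Int) :
    l.foldl (fun a t => if t ≤ level then a + 1 else a) acc
      = acc + (l.countP (fun t => decide (t ≤ level)) : Int) := by
  induction l generalizing acc with
  | nil => simp
  | cons h t ih =>
      simp only [List.foldl, List.countP_cons]
      by_cases hc : h ≤ level <;> simp [hc, ih] <;> ring

-- A's break-loop on a (· ≤ ·)-sorted list counts ALL elements ≤ level
theorem loopA_eq (level : Int) (l : List Int) (tier : Int)
    (hs : l.Pairwise (· ≤ ·)) :
    get_tier_loopA level l tier = tier + (l.countP (fun t => decide (t ≤ level)) : Int) := by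
  induction l generalizing tier with
  | nil => simp [get_tier_loopA]
  | cons h t ih =>
      rcases List.pairwise_cons.mp hs with ⟨hall, ht⟩
      simp only [get_tier_loopA, List.countP_cons]
      by_cases hc : level ≥ h
      · simp only [if_pos hc, ih _ ht]
        have : decide (h ≤ level) = true := by simpa using hc
        simp [this]; ring
      · -- break: every element of h :: t exceeds level
        have hcount : t.countP (fun x => decide (x ≤ level)) = 0 := by
          apply List.countP_eq_zero.mpr
          intro x hx
          have := hall x hx
          simp only [decide_eq_true_eq]
          omega
        have : decide (h ≤ level) = false := by simp; omega
        simp [if_neg hc, hcount, this]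

-- countP is invariant under permutation, so the sort can be dropped
theorem count_sorted_eq (level : Int) (xs : List Int) :
    (PySem.List.sorted xs (fun x => x) false).countP (fun t => decide (t ≤ level))
      = xs.countP (fun t => decide (t ≤ level)) :=
  (PySem.List.sorted_perm xs (fun x => x) false).countP_eq _

-- ===== VERDICT (by name: the statement is the Claim_ definition above) =====
theorem get_tier_for_level_spec : Claim_equal_get_tier_for_level := by
  intro level xs _
  unfold Spec_get_tier_for_level get_tier_for_level get_tier_for_level_alt
  by_cases h : level < 1
  · simp [h]
  · simp only [if_neg h]
    rw [loopA_eq level _ 1 (PySem.List.sorted_pairwise xs (fun x => x)),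
        count_sorted_eq, foldl_count_eq]
    ring
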